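-- pv_equiv track=rewrite | github.com/AndreaDiMartin/ParcialLengujesPr | Examen 3/medioProlog.py | separadorPredicado
-- ===== SOURCE A (Python) =====
-- def separadorPredicado(str):
--     lista = []
--     aux = ""
--     for i in str:
--         if(i == "(" or i == "," or i == ")"):
--             lista.append(aux)
--             aux = ""
--         elif(i == " "):
--             pass
--         else:
--             aux += i
--     if(aux != ""):
--         lista.append(aux)
--     return lista
-- ===== SOURCE B (Python) =====
-- def separadorPredicado(str):
--     # Rewrite: normalise the string once (drop spaces, turn both kinds of
--     # parentheses into commas), split on the single delimiter, and drop the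
--     # one trailing empty field that split produces when the string ends in a
--     # delimiter (A only appends the final accumulator when non-empty).
--     parts = str.replace(" ", "").replace("(", ",").replace(")", ",").split(",")
--     if parts[-1] == "":
--         parts.pop()
--     return parts
-- ===== Notes on version B (the rewrite author's own statement) =====
-- stated objective: idiomatic
-- what changed: Replaces A's character-by-character accumulator loop with a one-shot pipeline: strip spaces, map both parentheses to commas, split on the comma delimiter, and pop the single trailing empty field that split produces when A's final accumulator is empty.
import Mathlib
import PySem

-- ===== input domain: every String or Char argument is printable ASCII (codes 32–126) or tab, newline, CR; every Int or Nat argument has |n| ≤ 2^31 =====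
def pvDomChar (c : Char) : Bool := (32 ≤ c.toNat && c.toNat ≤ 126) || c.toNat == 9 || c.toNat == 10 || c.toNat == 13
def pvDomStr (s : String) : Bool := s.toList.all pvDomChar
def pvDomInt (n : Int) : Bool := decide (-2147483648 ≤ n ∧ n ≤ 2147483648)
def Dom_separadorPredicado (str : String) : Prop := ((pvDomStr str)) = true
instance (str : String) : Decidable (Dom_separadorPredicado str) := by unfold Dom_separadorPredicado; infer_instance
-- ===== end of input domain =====

-- B normalises the string once (drop spaces, turn '(' and ')' into ','), splits on ',' and
-- drops the single trailing empty field; same tokens as A's character loop, stated as simpler/idiomatic.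

-- ===== PORT A =====
def separadorPredicado (str : String) : List String :=
  let st := str.toList.foldl
    (fun (st : List String × String) i =>
      if i = '(' ∨ i = ',' ∨ i = ')' then (st.1 ++ [st.2], "")
      else if i = ' ' then st
      else (st.1, st.2.push i))
    ([], "")
  if st.2 ≠ "" then st.1 ++ [st.2] else st.1

-- ===== PORT B =====
-- helper for Source B's `if parts[-1] == "": parts.pop()` (parts from split is never empty)
def pyPopTrailingEmpty (parts : List String) : List String :=
  if parts.getLast? = some "" then parts.dropLast else parts

def separadorPredicado_alt (str : String) : List String :=
  let s2 := PySem.Str.replace (PySem.Str.replace (PySem.Str.replace str " " "") "(" ",") ")" ","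
  let parts := (PySem.Str.split? s2 ",").getD []
  pyPopTrailingEmpty parts

-- ===== PRECONDITION & SPEC =====
def Spec_separadorPredicado (str : String) (out : List String) : Prop := out = separadorPredicado_alt str
instance (str : String) (out : List String) : Decidable (Spec_separadorPredicado str out) := by unfold Spec_separadorPredicado; infer_instance

-- ===== CLAIM (what is proved, stated in full; the proofs are below) =====
def Claim_equal_separadorPredicado : Prop := ∀ (str : String), Dom_separadorPredicado str → Spec_separadorPredicado str (separadorPredicado str)

-- ===== LEMMAS AND PROOFS =====

-- reference splitter on commas: `cur` is the reversed current field
def mySplit (cur : List Char) : List Char → List (List Char)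
  | [] => [cur.reverse]
  | c :: t => if c = ',' then cur.reverse :: mySplit [] t else mySplit (c :: cur) t

-- turn char fields into strings, dropping one trailing empty field
def finalize : List (List Char) → List String
  | [] => []
  | [x] => if x = [] then [] else [String.ofList x]
  | x :: y :: r => String.ofList x :: finalize (y :: r)

-- the normalisation B performs, as a pure list function
def normT (l : List Char) : List Char :=
  ((l.filter (· ≠ ' ')).map (fun c => if c = '(' then ',' else c)).map (fun c => if c = ')' then ',' else c)

lemma replace_go_del (fuel : Nat) : ∀ (l acc : List Char), l.length ≤ fuel →
    PySem.Chars.replace.go [' '] [] fuel l acc = acc.reverse ++ l.filter (· ≠ ' ') := by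
  induction fuel with
  | zero => intro l acc h; rw [PySem.Chars.replace.go.eq_def]
             ; cases l with
             | nil => simp
             | cons c t => simp at h
  | succ n ih => intro l acc h
                 rw [PySem.Chars.replace.go.eq_def]
                 cases l with
                 | nil => simp
                 | cons c t =>
                   simp only [List.length_cons, Nat.succ_le_succ_iff] at h
                   by_cases hc : c = ' '
                   · subst hc
                     simp [List.isPrefixOf, ih t _ h]
                   · have : ¬ ([' '].isPrefixOf (c :: t) = true) := by
                       simp [List.isPrefixOf]; intro hh; exact hc hh.symm
                     simp [this, ih t _ h, hc]

lemma replace_go_map (o : Char) (fuel : Nat) : ∀ (l acc : List Char), l.length ≤ fuel →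
    PySem.Chars.replace.go [o] [','] fuel l acc
      = acc.reverse ++ l.map (fun c => if c = o then ',' else c) := by
  induction fuel with
  | zero => intro l acc h; rw [PySem.Chars.replace.go.eq_def]
             ; cases l with
             | nil => simp
             | cons c t => simp at h
  | succ n ih => intro l acc h
                 rw [PySem.Chars.replace.go.eq_def]
                 cases l with
                 | nil => simp
                 | cons c t =>
                   simp only [List.length_cons, Nat.succ_le_succ_iff] at h
                   by_cases hc : c = o
                   · subst hc
                     simp [List.isPrefixOf, ih t _ h]
                   · have : ¬ ([o].isPrefixOf (c :: t) = true) := by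
                       simp [List.isPrefixOf]; intro hh; exact hc hh.symm
                     simp [this, ih t _ h, hc]

lemma replace_del (l : List Char) :
    PySem.Chars.replace l [' '] [] = l.filter (· ≠ ' ') := by
  have := replace_go_del l.length l [] (le_refl _)
  simpa [PySem.Chars.replace] using this

lemma replace_map (o : Char) (l : List Char) :
    PySem.Chars.replace l [o] [','] = l.map (fun c => if c = o then ',' else c) := by
  have := replace_go_map o l.length l [] (le_refl _)
  simpa [PySem.Chars.replace] using this

lemma splitOn_go_eq (fuel : Nat) : ∀ (l cur : List Char) (acc : List (List Char)),
    l.length < fuel →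
    PySem.Chars.splitOn.go [','] fuel l cur acc = acc.reverse ++ mySplit cur l := by
  induction fuel with
  | zero => intro l cur acc h; exact absurd h (Nat.not_lt_zero _)
  | succ n ih => intro l cur acc h
                 rw [PySem.Chars.splitOn.go.eq_def]
                 cases l with
                 | nil => simp [mySplit]
                 | cons c t =>
                   simp only [List.length_cons, Nat.succ_lt_succ_iff] at h
                   by_cases hc : c = ','
                   · subst hc
                     simp [List.isPrefixOf, ih t [] _ h, mySplit]
                   · have : ¬ ([','].isPrefixOf (c :: t) = true) := by
                       simp [List.isPrefixOf]; intro hh; exact hc hh.symm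
                     simp [this, ih t (c :: cur) _ h, mySplit, hc]

lemma splitOn_eq (l : List Char) :
    PySem.Chars.splitOn l [','] = mySplit [] l := by
  have := splitOn_go_eq (l.length + 1) l [] [] (by omega)
  simpa [PySem.Chars.splitOn] using this

lemma mySplit_ne_nil (cur l : List Char) : mySplit cur l ≠ [] := by
  induction l generalizing cur with
  | nil => simp [mySplit]
  | cons c t ih => by_cases hc : c = ',' <;> simp [mySplit, hc, ih]

lemma finalize_cons (x : List Char) (r : List (List Char)) (hr : r ≠ []) :
    finalize (x :: r) = String.ofList x :: finalize r := by
  cases r with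
  | nil => exact absurd rfl hr
  | cons y s => rfl

lemma pop_eq_finalize (ps : List (List Char)) (h : ps ≠ []) :
    pyPopTrailingEmpty (ps.map String.ofList) = finalize ps := by
  induction ps with
  | nil => exact absurd rfl h
  | cons x r ih =>
    cases r with
    | nil =>
      by_cases hx : x = []
      · subst hx; simp [pyPopTrailingEmpty, finalize]
      · have : String.ofList x ≠ "" := by
          intro hh
          have := congrArg String.toList hh
          simp at this
          exact hx this
        simp [pyPopTrailingEmpty, finalize, hx, this]
    | cons y s =>
      have hr : (y :: s : List (List Char)) ≠ [] := by simp
      have ih' := ih hr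
      rw [finalize_cons x (y :: s) hr, ← ih']
      simp only [List.map_cons, pyPopTrailingEmpty]
      have hlast : ((String.ofList x :: String.ofList y :: s.map String.ofList).getLast?)
          = (String.ofList y :: s.map String.ofList).getLast? := by
        simp [List.getLast?_cons_cons]
      rw [hlast]
      by_cases hcase : (String.ofList y :: s.map String.ofList).getLast? = some ""
      · simp [hcase, List.dropLast_cons_of_ne_nil]
      · simp [hcase]

def runA (l : List Char) (lista : List String) (aux : String) : List String :=
  let st := l.foldl
    (fun (st : List String × String) i =>
      if i = '(' ∨ i = ',' ∨ i = ')' then (st.1 ++ [st.2], "")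
      else if i = ' ' then st
      else (st.1, st.2.push i))
    (lista, aux)
  if st.2 ≠ "" then st.1 ++ [st.2] else st.1

lemma runA_cons (c : Char) (t : List Char) (lista : List String) (aux : String) :
    runA (c :: t) lista aux =
      if c = '(' ∨ c = ',' ∨ c = ')' then runA t (lista ++ [aux]) ""
      else if c = ' ' then runA t lista aux
      else runA t lista (aux.push c) := by
  by_cases hd : c = '(' ∨ c = ',' ∨ c = ')'
  · simp [runA, List.foldl_cons, hd]
  · by_cases hs : c = ' '
    · simp [runA, List.foldl_cons, hs]
    · simp [runA, List.foldl_cons, hd, hs]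

lemma foldA_eq (l : List Char) : ∀ (lista : List String) (aux : String),
    runA l lista aux = lista ++ finalize (mySplit aux.toList.reverse (normT l)) := by
  induction l with
  | nil =>
    intro lista aux
    simp only [runA, List.foldl_nil, normT, List.filter_nil, List.map_nil, mySplit,
      List.reverse_reverse]
    by_cases ha : aux = ""
    · subst ha; simp [finalize]
    · have h1 : aux.toList ≠ [] := by
        intro hh
        apply ha
        have := congrArg String.ofList hh
        simpa using this
      simp [ha, finalize, h1]
  | cons c t ih =>
    intro lista aux
    rw [runA_cons]
    by_cases hd : c = '(' ∨ c = ',' ∨ c = ')'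
    · have hs : c ≠ ' ' := by rcases hd with h|h|h <;> subst h <;> decide
      have hnorm : normT (c :: t) = ',' :: normT t := by
        rcases hd with h|h|h <;> subst h <;> simp [normT]
      rw [if_pos hd, ih (lista ++ [aux]) "", hnorm]
      rw [show mySplit aux.toList.reverse (',' :: normT t) = aux.toList :: mySplit [] (normT t)
            from by simp [mySplit]]
      rw [finalize_cons _ _ (mySplit_ne_nil _ _)]
      simp
    · rw [if_neg hd]
      by_cases hs : c = ' '
      · subst hs
        have hnorm : normT (' ' :: t) = normT t := by simp [normT]
        rw [if_pos rfl, ih lista aux, hnorm]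
      · have hnorm : normT (c :: t) = c :: normT t := by
          have h1 : c ≠ '(' := fun h => hd (Or.inl h)
          have h3 : c ≠ ')' := fun h => hd (Or.inr (Or.inr h))
          simp [normT, hs, h1, h3]
        rw [if_neg hs, ih lista (aux.push c), hnorm]
        simp only [mySplit]
        have hcom : c ≠ ',' := fun h => hd (Or.inr (Or.inl h))
        rw [if_neg hcom]
        congr 2
        simp [String.toList_push]

lemma alt_eq (str : String) :
    separadorPredicado_alt str = finalize (mySplit [] (normT str.toList)) := by
  have hlist :
      (PySem.Str.replace (PySem.Str.replace (PySem.Str.replace str " " "") "(" ",") ")" ",").toList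
        = normT str.toList := by
    simp only [PySem.Str.replace, String.toList_ofList]
    have h1 : (" " : String).toList = [' '] := rfl
    have h2 : ("" : String).toList = [] := rfl
    have h3 : ("(" : String).toList = ['('] := rfl
    have h4 : (")" : String).toList = [')'] := rfl
    have h5 : ("," : String).toList = [','] := rfl
    rw [h1, h2, h3, h4, h5, replace_del, replace_map, replace_map]
    rfl
  unfold separadorPredicado_alt
  simp only [PySem.Str.split?, PySem.Chars.split?]
  have hsep : (("," : String).toList).isEmpty = false := rfl
  simp only [hsep, Bool.false_eq_true, if_false, Option.map_some, Option.getD_some]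
  rw [hlist, show ("," : String).toList = [','] from rfl, splitOn_eq]
  exact pop_eq_finalize _ (mySplit_ne_nil _ _)

-- ===== VERDICT (by name: the statement is the Claim_ definition above) =====
theorem separadorPredicado_spec : Claim_equal_separadorPredicado := by
  intro str _
  unfold Spec_separadorPredicado
  rw [alt_eq]
  have := foldA_eq str.toList [] ""
  simpa [separadorPredicado, runA] using this
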